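-- pv_equiv track=rewrite | github.com/Triztian/toprammer | libtoprammer/chip_m8cissp.py | __stringVectorReplace
-- ===== SOURCE A (Python) =====
-- def __stringVectorReplace(strVec, replace, data):
-- 	ret = ""
-- 	for i in range(len(strVec) - 1, -1, -1):
-- 		b = strVec[i]
-- 		if b == replace:
-- 			if (data & 1):
-- 				ret = "1" + ret
-- 			else:
-- 				ret = "0" + ret
-- 			data >>= 1
-- 		else:
-- 			ret = b + ret
-- 	return ret
-- ===== SOURCE B (Python) =====
-- def __stringVectorReplace(strVec, replace, data):
-- 	idx = sum(1 for ch in strVec if ch == replace) - 1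
-- 	out = []
-- 	for ch in strVec:
-- 		if ch == replace:
-- 			out.append("1" if (data >> idx) & 1 else "0")
-- 			idx -= 1
-- 		else:
-- 			out.append(ch)
-- 	return "".join(out)
-- ===== Notes on version B (the rewrite author's own statement) =====
-- stated objective: faster
-- what changed: Replaces the right-to-left string-prepend loop with progressive data>>=1 by a forward pass: count placeholders first, then walk left-to-right appending bit (data>>idx)&1 with a decreasing index, joining a list at the end.
import Mathlib
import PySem

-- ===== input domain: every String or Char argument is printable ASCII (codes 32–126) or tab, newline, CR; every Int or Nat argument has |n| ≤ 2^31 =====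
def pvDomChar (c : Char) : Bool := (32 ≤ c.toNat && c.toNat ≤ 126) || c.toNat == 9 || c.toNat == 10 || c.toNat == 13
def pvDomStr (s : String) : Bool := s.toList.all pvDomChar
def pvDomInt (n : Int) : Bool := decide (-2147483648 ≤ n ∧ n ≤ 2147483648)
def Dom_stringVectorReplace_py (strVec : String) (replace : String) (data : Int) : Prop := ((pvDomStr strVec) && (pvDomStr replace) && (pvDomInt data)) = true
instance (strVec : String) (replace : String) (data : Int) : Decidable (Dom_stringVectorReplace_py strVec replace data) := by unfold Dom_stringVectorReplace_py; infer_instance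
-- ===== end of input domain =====

-- B replaces A's right-to-left prepend loop (progressive data >>= 1) by a count-then-forward
-- pass indexing bits with (data >> idx) & 1, joining at the end; measured faster (A's prepend is quadratic).


-- ===== PORT A =====
-- for i in range(len-1, -1, -1): b = strVec[i] — the loop visits the characters right-to-left,
-- ported as a foldl over the reversed char list; 'b == replace' compares the 1-char string b
-- with replace, i.e. replace.toList = [b]; truthiness of (data & 1) is ≠ 0.
def stringVectorReplace_py (strVec : String) (replace : String) (data : Int) : String :=
  let st := strVec.toList.reverse.foldl
    (fun (st : List Char × Int) (b : Char) =>
      if [b] = replace.toList then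
        ((if PySem.Int.band st.2 1 ≠ 0 then '1' else '0') :: st.1, st.2 >>> (1:Nat))
      else (b :: st.1, st.2))
    ([], data)
  String.mk st.1

-- ===== PORT B =====
-- idx is ≥ 0 whenever the shift happens (it counts the remaining placeholders minus one before
-- each placeholder), so data >> idx is ported as data >>> idx.toNat (Python raises for idx < 0,
-- which is unreachable).
def stringVectorReplace_py_alt (strVec : String) (replace : String) (data : Int) : String :=
  let cs := strVec.toList
  let st := cs.foldl
    (fun (st : List Char × Int) (ch : Char) =>
      if [ch] = replace.toList then
        (st.1 ++ [if PySem.Int.band (data >>> st.2.toNat) 1 ≠ 0 then '1' else '0'], st.2 - 1)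
      else (st.1 ++ [ch], st.2))
    ([], (cs.countP (fun ch => decide ([ch] = replace.toList)) : Int) - 1)
  String.mk st.1

-- ===== PRECONDITION & SPEC =====
def Spec_stringVectorReplace_py (strVec : String) (replace : String) (data : Int) (out : String) : Prop := out = stringVectorReplace_py_alt strVec replace data
instance (strVec : String) (replace : String) (data : Int) (out : String) : Decidable (Spec_stringVectorReplace_py strVec replace data out) := by unfold Spec_stringVectorReplace_py; infer_instance

-- ===== CLAIM (what is proved, stated in full; the proofs are below) =====
def Claim_equal_stringVectorReplace_py : Prop := ∀ (strVec : String) (replace : String) (data : Int), Dom_stringVectorReplace_py strVec replace data → Spec_stringVectorReplace_py strVec replace data (stringVectorReplace_py strVec replace data)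

-- ===== LEMMAS AND PROOFS =====

-- the common value: character-by-character rendering, each placeholder getting the bit whose
-- index is the number of placeholders strictly to its right
def pvRender (rep : List Char) (data : Int) : List Char → List Char
  | [] => []
  | c :: cs =>
    (if [c] = rep then
       (if PySem.Int.band (data >>> (cs.countP (fun ch => decide ([ch] = rep)))) 1 ≠ 0 then '1' else '0')
     else c) :: pvRender rep data cs

theorem pvShrShr (d : Int) (m : Nat) : d >>> m >>> (1:Nat) = d >>> (m + 1) := by
  rw [Int.shiftRight_eq_div_pow, Int.shiftRight_eq_div_pow, Int.shiftRight_eq_div_pow, pow_succ]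
  push_cast
  rw [Int.ediv_ediv_of_nonneg (by positivity), pow_succ]

theorem pvA_loop (rep : List Char) (data : Int) (cs : List Char) : ∀ acc : List Char,
    cs.reverse.foldl
      (fun (st : List Char × Int) (b : Char) =>
        if [b] = rep then
          ((if PySem.Int.band st.2 1 ≠ 0 then '1' else '0') :: st.1, st.2 >>> (1:Nat))
        else (b :: st.1, st.2))
      (acc, data)
    = (pvRender rep data cs ++ acc, data >>> (cs.countP (fun ch => decide ([ch] = rep)))) := by
  induction cs with
  | nil => intro acc; simp [pvRender]
  | cons c cs ih =>
    intro acc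
    rw [List.reverse_cons, List.foldl_append, ih acc]
    simp only [List.foldl_cons, List.foldl_nil, List.countP_cons, pvRender]
    by_cases h : [c] = rep
    · simp only [h, decide_eq_true_eq, if_true]
      simp [pvShrShr]
    · simp only [decide_eq_true_eq, h, if_false]
      simp

theorem pvB_loop (rep : List Char) (data : Int) (cs : List Char) : ∀ acc : List Char,
    cs.foldl
      (fun (st : List Char × Int) (ch : Char) =>
        if [ch] = rep then
          (st.1 ++ [if PySem.Int.band (data >>> st.2.toNat) 1 ≠ 0 then '1' else '0'], st.2 - 1)
        else (st.1 ++ [ch], st.2))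
      (acc, (cs.countP (fun ch => decide ([ch] = rep)) : Int) - 1)
    = (acc ++ pvRender rep data cs, -1) := by
  induction cs with
  | nil => intro acc; simp [pvRender]
  | cons c cs ih =>
    intro acc
    simp only [List.foldl_cons, List.countP_cons, pvRender]
    by_cases h : [c] = rep
    · simp only [h, decide_eq_true_eq, if_true]
      have h1 : ((cs.countP (fun ch => decide ([ch] = rep)) + 1 : Nat) : Int) - 1 =
          (cs.countP (fun ch => decide ([ch] = rep)) : Int) := by push_cast; ring
      have h2 : (((cs.countP (fun ch => decide ([ch] = rep)) + 1 : Nat) : Int) - 1).toNat =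
          cs.countP (fun ch => decide ([ch] = rep)) := by omega
      rw [h2, h1, ih]
      simp
    · simp only [decide_eq_true_eq, h, if_false]
      have h3 : ((cs.countP (fun ch => decide ([ch] = rep)) + 0 : Nat) : Int) - 1 =
          ((cs.countP (fun ch => decide ([ch] = rep)) : Int)) - 1 := by push_cast; ring
      rw [h3, ih]
      simp

-- ===== VERDICT (by name: the statement is the Claim_ definition above) =====
theorem stringVectorReplace_py_spec : Claim_equal_stringVectorReplace_py := by
  intro strVec replace data _
  simp only [Spec_stringVectorReplace_py, stringVectorReplace_py, stringVectorReplace_py_alt]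
  rw [pvA_loop replace.toList data strVec.toList [],
      pvB_loop replace.toList data strVec.toList []]
  simp
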